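-- pv_equiv track=rewrite | github.com/HoloClean/RecordFusion | domain/dfa.py | create_new
-- ===== SOURCE A (Python) =====
-- def create_new(key):
--     """
--     create a new automaton from the begining
--     :param key: key value that we will use it to create the automaton
--     :return: automaon
--     """
--     automaton = {}
--     prev_char = -1
--     position = 0
--     automaton[position] = {}
--
--     for char in key:
--         if prev_char != char:
--             automaton[position][char] = position + 1
--             prev_char = char
--             position = position + 1
--             automaton[position] = {}
--         else:
--             automaton[position][char] = position
--     return automaton
-- ===== SOURCE B (Python) =====
-- def create_new(key):
--     """Two-pointer run scanner: one state per run of equal characters, no prev_char sentinel."""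
--     automaton = {0: {}}
--     s = 0
--     i = 0
--     n = len(key)
--     while i < n:
--         ch = key[i]
--         j = i + 1
--         while j < n and key[j] == ch:
--             j += 1
--         automaton[s][ch] = s + 1
--         automaton[s + 1] = {ch: s + 1} if j - i > 1 else {}
--         s += 1
--         i = j
--     return automaton
-- ===== Notes on version B (the rewrite author's own statement) =====
-- stated objective: alternative
-- what changed: B scans runs of equal characters with a two-pointer index loop, emitting one state per run with an explicit self-loop for runs longer than one, instead of A's per-character loop with a prev_char sentinel and duplicate-overwrite.
import Mathlib
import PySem

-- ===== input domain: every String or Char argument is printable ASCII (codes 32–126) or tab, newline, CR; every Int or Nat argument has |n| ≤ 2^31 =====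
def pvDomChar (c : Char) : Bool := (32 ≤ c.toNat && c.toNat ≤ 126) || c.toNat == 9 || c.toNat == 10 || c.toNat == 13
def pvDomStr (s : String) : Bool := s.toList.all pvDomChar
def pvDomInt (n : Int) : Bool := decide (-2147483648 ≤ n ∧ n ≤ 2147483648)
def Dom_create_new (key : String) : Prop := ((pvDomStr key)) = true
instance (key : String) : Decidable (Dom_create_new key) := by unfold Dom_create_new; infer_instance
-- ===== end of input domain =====

-- B replaces A's per-character prev_char-sentinel loop with a two-pointer scan over runs of
-- equal characters (one state per run, a self-loop written once for runs longer than one).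

-- ===== PORT A =====
-- A's for-loop; the Python sentinel prev_char = -1 (an int, never equal to a character)
-- is modelled as `none`.
def createNewLoopA (cs : List Char) (automaton : PySem.Dict Int (PySem.Dict String Int))
    (prev : Option Char) (pos : Int) : PySem.Dict Int (PySem.Dict String Int) :=
  match cs with
  | [] => automaton
  | c :: rest =>
    if prev ≠ some c then
      -- automaton[position][char] = position + 1
      let automaton := automaton.modify pos PySem.Dict.empty
        (fun inner => inner.insert (String.singleton c) (pos + 1))
      -- automaton[position + 1] = {}
      let automaton := automaton.insert (pos + 1) PySem.Dict.empty
      createNewLoopA rest automaton (some c) (pos + 1)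
    else
      -- automaton[position][char] = position
      createNewLoopA rest
        (automaton.modify pos PySem.Dict.empty
          (fun inner => inner.insert (String.singleton c) pos))
        prev pos

def create_new (key : String) : List (Int × List (String × Int)) :=
  let automaton : PySem.Dict Int (PySem.Dict String Int) :=
    PySem.Dict.empty.insert 0 PySem.Dict.empty
  (createNewLoopA key.toList automaton none 0).items.map (fun p => (p.1, p.2.items))

-- ===== PORT B =====
-- B's outer while loop over i; the inner `while j < n and key[j] == ch` scan is exactly the
-- takeWhile/dropWhile split of the remaining characters (j - i = run.length + 1).
def createNewLoopB (cs : List Char) (s : Int)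
    (automaton : PySem.Dict Int (PySem.Dict String Int)) : PySem.Dict Int (PySem.Dict String Int) :=
  match cs with
  | [] => automaton
  | c :: rest =>
    let run := rest.takeWhile (· == c)    -- inner while: j advances past equal chars
    let tail := rest.dropWhile (· == c)
    -- automaton[s][ch] = s + 1
    let automaton := automaton.modify s PySem.Dict.empty
      (fun inner => inner.insert (String.singleton c) (s + 1))
    -- automaton[s + 1] = {ch: s + 1} if j - i > 1 else {}
    let automaton := automaton.insert (s + 1)
      (if run.length + 1 > 1 then PySem.Dict.empty.insert (String.singleton c) (s + 1)
       else PySem.Dict.empty)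
    createNewLoopB tail (s + 1) automaton
termination_by cs.length
decreasing_by
  calc (rest.dropWhile (· == c)).length ≤ rest.length := rest.length_dropWhile_le _
    _ < (c :: rest).length := by simp

def create_new_alt (key : String) : List (Int × List (String × Int)) :=
  let automaton : PySem.Dict Int (PySem.Dict String Int) :=
    PySem.Dict.empty.insert 0 PySem.Dict.empty
  (createNewLoopB key.toList 0 automaton).items.map (fun p => (p.1, p.2.items))

-- ===== PRECONDITION & SPEC =====
def Spec_create_new (key : String) (out : List (Int × List (String × Int))) : Prop := out = create_new_alt key
instance (key : String) (out : List (Int × List (String × Int))) : Decidable (Spec_create_new key out) := by unfold Spec_create_new; infer_instance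

-- ===== CLAIM (what is proved, stated in full; the proofs are below) =====
def Claim_equal_create_new : Prop := ∀ (key : String), Dom_create_new key → Spec_create_new key (create_new key)

-- ===== LEMMAS AND PROOFS =====

-- The head of dropWhile, when present, fails the predicate.
lemma head?_dropWhile_false (p : Char → Bool) (l : List Char) (x : Char)
    (h : (l.dropWhile p).head? = some x) : ¬ p x := by
  induction l with
  | nil => simp at h
  | cons a t ih =>
    rw [List.dropWhile_cons] at h
    by_cases hp : p a
    · simp [hp] at h; exact ih h
    · simp [hp] at h; subst h; simp [hp]

-- Writing automaton[pos][c] = v twice is the same as writing it once.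
lemma modify_insert_idem (d : PySem.Dict Int (PySem.Dict String Int)) (pos : Int) (c : String) (v : Int) :
    ((d.modify pos PySem.Dict.empty (fun inner => inner.insert c v)).modify pos PySem.Dict.empty
      (fun inner => inner.insert c v))
    = d.modify pos PySem.Dict.empty (fun inner => inner.insert c v) := by
  simp [PySem.Dict.modify, PySem.Dict.getD_insert_self, PySem.Dict.insert_insert_self]

-- A's repeated characters after the first collapse into one (idempotent) self-loop write.
lemma runA_absorb (cs : List Char) (c : Char) (s : Int)
    (d : PySem.Dict Int (PySem.Dict String Int)) :
    createNewLoopA cs d (some c) s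
    = createNewLoopA (cs.dropWhile (· == c))
        (if cs.takeWhile (· == c) = [] then d
         else d.modify s PySem.Dict.empty (fun inner => inner.insert (String.singleton c) s))
        (some c) s := by
  induction cs generalizing d with
  | nil => simp
  | cons x rest ih =>
    by_cases hx : x = c
    · subst hx
      rw [createNewLoopA]
      simp only [List.takeWhile_cons, List.dropWhile_cons, beq_self_eq_true, if_true, ne_eq,
        not_true_eq_false, if_false, reduceCtorEq]
      rw [ih]
      by_cases hr : rest.takeWhile (· == x) = []
      · simp [hr]
      · simp [hr, modify_insert_idem]
    · have hbx : (x == c) = false := by simp [hx]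
      simp [hbx]

-- Main invariant: when the next character differs from prev, A's loop equals B's loop.
lemma loops_agree (n : Nat) : ∀ (cs : List Char), cs.length ≤ n →
    ∀ (prev : Option Char) (s : Int) (d : PySem.Dict Int (PySem.Dict String Int)),
    (∀ c, cs.head? = some c → prev ≠ some c) →
    createNewLoopA cs d prev s = createNewLoopB cs s d := by
  induction n with
  | zero =>
    intro cs hlen prev s d _
    have : cs = [] := List.eq_nil_of_length_eq_zero (Nat.le_zero.mp hlen)
    subst this; rw [createNewLoopA, createNewLoopB]
  | succ n ih =>
    intro cs hlen prev s d hprev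
    match cs with
    | [] => rw [createNewLoopA, createNewLoopB]
    | c :: rest =>
      have hne : prev ≠ some c := hprev c rfl
      rw [createNewLoopA, createNewLoopB]
      simp only [hne, if_true, ne_eq, not_false_eq_true]
      rw [runA_absorb]
      have htail : (rest.dropWhile (· == c)).length ≤ n := by
        have h1 := rest.length_dropWhile_le (· == c)
        have h2 : rest.length + 1 ≤ n + 1 := by simpa using hlen
        omega
      have hhead : ∀ c', (rest.dropWhile (· == c)).head? = some c' →
          (some c : Option Char) ≠ some c' := by
        intro c' hc' h
        have hb := head?_dropWhile_false (· == c) rest c' hc'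
        apply hb
        simp [← Option.some.inj h]
      rw [ih _ htail (some c) (s + 1) _ hhead]
      by_cases hr : rest.takeWhile (· == c) = []
      · simp [hr]
      · have hl : 0 < (rest.takeWhile (· == c)).length := List.length_pos_iff.mpr hr
        simp [hr, hl, PySem.Dict.modify, PySem.Dict.getD_insert_self,
          PySem.Dict.insert_insert_self]

-- ===== VERDICT (by name: the statement is the Claim_ definition above) =====
theorem create_new_spec : Claim_equal_create_new := by
  intro key _
  have h := loops_agree key.toList.length key.toList le_rfl none 0
    (PySem.Dict.empty.insert 0 PySem.Dict.empty) (by intro c _ hc; cases hc)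
  simp only [Spec_create_new, create_new, create_new_alt, h]
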